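-- pv_equiv track=rewrite | github.com/Hiten-dev-ai/rmkcet-shine | backend/app.py | _scope_pairs_to_nav_map
-- ===== SOURCE A (Python) =====
-- def _scope_pairs_to_nav_map(scope_pairs):
--     """Convert scope tuple set/list into sorted dept list and dept->years map."""
--     years_by_department = {}
--     for dep, yr in sorted(set(scope_pairs or [])):
--         years_by_department.setdefault(dep, []).append(int(yr))
--     for dep in list(years_by_department.keys()):
--         years_by_department[dep] = sorted(set(years_by_department[dep]))
--     departments = sorted(years_by_department.keys())
--     return departments, years_by_department
-- ===== SOURCE B (Python) =====
-- def _scope_pairs_to_nav_map(scope_pairs):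
--     """Convert scope tuple set/list into sorted dept list and dept->years map."""
--     pairs = sorted(set(scope_pairs or []))
--     items = []
--     i, n = 0, len(pairs)
--     while i < n:
--         dep = pairs[i][0]
--         j = i
--         while j < n and pairs[j][0] == dep:
--             j += 1
--         items.append((dep, [int(yr) for _, yr in pairs[i:j]]))
--         i = j
--     return [dep for dep, _ in items], dict(items)
-- ===== Notes on version B (the rewrite author's own statement) =====
-- stated objective: alternative
-- what changed: B replaces A's hash-map grouping (setdefault/append) plus a second dict-rewrite pass with sorted(set(..)) per key by a single groupby-style run scan over the globally sorted deduplicated pairs: equal departments are adjacent and years inside a run are already strictly increasing, so each run directly yields (dep, years) with no dict grouping and no per-key re-sort or re-dedup.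
import Mathlib
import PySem

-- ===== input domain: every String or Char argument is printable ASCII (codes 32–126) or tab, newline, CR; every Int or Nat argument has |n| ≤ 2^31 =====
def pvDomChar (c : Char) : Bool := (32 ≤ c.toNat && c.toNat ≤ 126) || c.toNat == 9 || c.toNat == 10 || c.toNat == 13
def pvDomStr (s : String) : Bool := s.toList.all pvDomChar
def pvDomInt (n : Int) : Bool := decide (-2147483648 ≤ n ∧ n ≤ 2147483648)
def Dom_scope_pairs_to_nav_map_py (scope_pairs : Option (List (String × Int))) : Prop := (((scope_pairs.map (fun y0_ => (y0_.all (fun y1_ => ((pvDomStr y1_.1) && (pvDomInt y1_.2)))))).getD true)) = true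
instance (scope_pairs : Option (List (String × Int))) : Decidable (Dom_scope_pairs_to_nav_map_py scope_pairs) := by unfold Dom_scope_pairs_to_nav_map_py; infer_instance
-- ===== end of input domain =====

-- B replaces A's dict grouping (setdefault/append) and its second sorted(set(..)) rewrite pass
-- by a single groupby-style run scan over the sorted deduplicated pairs (objective: alternative).

-- ===== PORT A =====
def scope_pairs_to_nav_map_py (scope_pairs : Option (List (String × Int))) : List String × (List (String × List Int)) :=
  -- for dep, yr in sorted(set(scope_pairs or [])):  (tuple order: by dep, then yr)
  let pairs := PySem.List.sorted2 (PySem.Set.ofList (scope_pairs.getD [])) Prod.fst Prod.snd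
  -- years_by_department.setdefault(dep, []).append(int(yr))  (int(yr) = yr on Int)
  let d1 := pairs.foldl (fun d p => d.modify p.1 [] (fun l => l ++ [p.2])) PySem.Dict.empty
  -- for dep in list(years_by_department.keys()): years_by_department[dep] = sorted(set(...))
  -- (the d[dep] read is ported as getD dep []: exact, dep is drawn from the dict's keys)
  let d2 := d1.keys.foldl (fun d k => d.insert k (PySem.List.sorted (PySem.Set.ofList (d.getD k [])) (fun y => y))) d1
  (PySem.List.sorted d2.keys (fun k => k), d2.items)

-- ===== PORT B =====
-- the run scan of Source B's outer while loop: each step takes the maximal run of the head's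
-- department (inner while j += 1 = takeWhile; i = j = continue on the dropWhile remainder)
def pvRuns : List (String × Int) → List (String × List Int)
  | [] => []
  | p :: t =>
      (p.1, ((p :: t).takeWhile (fun q => q.1 == p.1)).map Prod.snd) ::
      pvRuns (t.dropWhile (fun q => q.1 == p.1))
termination_by l => l.length
decreasing_by
  have h := (List.dropWhile_sublist (l := t) (p := fun q => q.1 == p.1)).length_le
  simp only [List.length_cons]; omega

def scope_pairs_to_nav_map_py_alt (scope_pairs : Option (List (String × Int))) : List String × (List (String × List Int)) :=
  -- pairs = sorted(set(scope_pairs or []))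
  let pairs := PySem.List.sorted2 (PySem.Set.ofList (scope_pairs.getD [])) Prod.fst Prod.snd
  -- the while loop collecting (dep, [int(yr) for _, yr in pairs[i:j]]) runs
  let items := pvRuns pairs
  -- return [dep for dep, _ in items], dict(items)
  (items.map Prod.fst, (items.foldl (fun d kv => d.insert kv.1 kv.2) PySem.Dict.empty).items)

-- ===== PRECONDITION & SPEC =====
def Spec_scope_pairs_to_nav_map_py (scope_pairs : Option (List (String × Int))) (out : List String × (List (String × List Int))) : Prop := out = scope_pairs_to_nav_map_py_alt scope_pairs
instance (scope_pairs : Option (List (String × Int))) (out : List String × (List (String × List Int))) : Decidable (Spec_scope_pairs_to_nav_map_py scope_pairs out) := by unfold Spec_scope_pairs_to_nav_map_py; infer_instance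

-- ===== CLAIM (what is proved, stated in full; the proofs are below) =====
def Claim_equal_scope_pairs_to_nav_map_py : Prop := ∀ (scope_pairs : Option (List (String × Int))), Dom_scope_pairs_to_nav_map_py scope_pairs → Spec_scope_pairs_to_nav_map_py scope_pairs (scope_pairs_to_nav_map_py scope_pairs)

-- ===== LEMMAS AND PROOFS =====

-- insertBy keeps Pairwise R when `before` decides R one way or the other
theorem pv_insertBy_pairwise {α : Type} (before : α → α → Bool) (R : α → α → Prop)
    (htrans : ∀ a b c, R a b → R b c → R a c)
    (htrue : ∀ a b, before a b = true → R a b)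
    (hfalse : ∀ a b, before a b = false → R b a)
    (x : α) (ys : List α) (h : ys.Pairwise R) :
    (PySem.List.insertBy before x ys).Pairwise R := by
  induction ys with
  | nil => simp [PySem.List.insertBy]
  | cons y t ih =>
      rw [List.pairwise_cons] at h
      by_cases hb : before x y = true
      · have hxy := htrue _ _ hb
        simp only [PySem.List.insertBy, hb, if_true]
        refine List.Pairwise.cons ?_ (List.Pairwise.cons h.1 h.2)
        intro z hz
        rcases List.mem_cons.mp hz with rfl | hz
        · exact hxy
        · exact htrans _ _ _ hxy (h.1 z hz)
      · have hyx := hfalse _ _ (Bool.not_eq_true _ ▸ hb)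
        simp only [PySem.List.insertBy, hb]
        refine List.Pairwise.cons ?_ (ih h.2)
        intro z hz
        rcases (PySem.List.mem_insertBy _ _ _ _).mp hz with rfl | hz
        · exact hyx
        · exact h.1 z hz

theorem pv_foldl_insertBy_pairwise {α : Type} (before : α → α → Bool) (R : α → α → Prop)
    (htrans : ∀ a b c, R a b → R b c → R a c)
    (htrue : ∀ a b, before a b = true → R a b)
    (hfalse : ∀ a b, before a b = false → R b a)
    (xs : List α) : ∀ acc : List α, acc.Pairwise R →
    (xs.foldl (fun acc x => PySem.List.insertBy before x acc) acc).Pairwise R := by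
  induction xs with
  | nil => intro acc hacc; exact hacc
  | cons a xs ih =>
      intro acc hacc
      exact ih _ (pv_insertBy_pairwise before R htrans htrue hfalse a acc hacc)

-- the lexicographic preorder that A's/B's sorted(set(pairs)) establishes
def pvLex (a b : String × Int) : Prop := a.1 < b.1 ∨ (a.1 = b.1 ∧ a.2 ≤ b.2)

theorem pvLex_trans (a b c : String × Int) (h1 : pvLex a b) (h2 : pvLex b c) : pvLex a c := by
  rcases h1 with h1 | ⟨h1, h1'⟩ <;> rcases h2 with h2 | ⟨h2, h2'⟩
  · exact Or.inl (lt_trans h1 h2)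
  · exact Or.inl (h2 ▸ h1)
  · exact Or.inl (h1 ▸ h2)
  · exact Or.inr ⟨h1.trans h2, le_trans h1' h2'⟩

theorem pv_sorted2_pairwise (xs : List (String × Int)) :
    (PySem.List.sorted2 xs Prod.fst Prod.snd).Pairwise pvLex := by
  refine pv_foldl_insertBy_pairwise
    (fun a b => decide (a.1 < b.1) || (!decide (b.1 < a.1) && decide (a.2 < b.2)))
    pvLex pvLex_trans ?_ ?_ xs [] List.Pairwise.nil
  · intro a b h
    simp only [Bool.or_eq_true, Bool.and_eq_true, Bool.not_eq_true', decide_eq_true_eq,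
      decide_eq_false_iff_not] at h
    rcases h with h | ⟨h1, h2⟩
    · exact Or.inl h
    · rcases lt_or_eq_of_le (not_lt.mp h1) with h | h
      · exact Or.inl h
      · exact Or.inr ⟨h, le_of_lt h2⟩
  · intro a b h
    simp only [Bool.or_eq_false_iff, Bool.and_eq_false_iff, Bool.not_eq_false',
      decide_eq_true_eq, decide_eq_false_iff_not] at h
    rcases h with ⟨h1, h2 | h2⟩
    · exact Or.inl h2
    · rcases lt_or_eq_of_le (not_lt.mp h1) with h | h
      · exact Or.inl h
      · exact Or.inr ⟨h, not_lt.mp h2⟩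

-- foldl Set.add appends a sublist of its argument
theorem pv_foldl_add_sublist {α : Type} [BEq α] (l : List α) :
    ∀ s : List α, ∃ t, l.foldl PySem.Set.add s = s ++ t ∧ t.Sublist l := by
  induction l with
  | nil => intro s; exact ⟨[], by simp, List.Sublist.refl _⟩
  | cons a l ih =>
      intro s
      rcases ih (PySem.Set.add s a) with ⟨t, ht, hs⟩
      by_cases hc : PySem.Set.contains s a = true
      · have hadd : PySem.Set.add s a = s := by simp [PySem.Set.add, PySem.Set.contains] at hc ⊢; simp [hc]
        refine ⟨t, ?_, hs.trans (List.sublist_cons_self a l)⟩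
        rw [List.foldl_cons, ht, hadd]
      · have hadd : PySem.Set.add s a = s ++ [a] := by simp [PySem.Set.add, PySem.Set.contains] at hc ⊢; simp [hc]
        refine ⟨a :: t, ?_, List.Sublist.cons₂ a hs⟩
        rw [List.foldl_cons, ht, hadd, List.append_assoc]
        rfl

theorem pv_ofList_sublist {α : Type} [BEq α] (l : List α) :
    (PySem.Set.ofList l).Sublist l := by
  rcases pv_foldl_add_sublist l [] with ⟨t, ht, hs⟩
  have : PySem.Set.ofList l = t := by
    rw [PySem.Set.ofList]; rw [show (PySem.Set.empty : List α) = [] from rfl] at *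
    simpa using ht
  rw [this]; exact hs

-- reading a key through A's rewrite loop over distinct keys
theorem pv_getD_foldl_insert_read_notmem (l : List String)
    (f : List Int → List Int) (d : PySem.Dict String (List Int)) (k : String) (hk : k ∉ l) :
    (l.foldl (fun d k => d.insert k (f (d.getD k []))) d).getD k [] = d.getD k [] := by
  induction l generalizing d with
  | nil => rfl
  | cons a l ih =>
      simp only [List.foldl_cons]
      rw [ih _ (fun h => hk (List.mem_cons_of_mem _ h))]
      rw [PySem.Dict.getD_insert, if_neg (fun (h : k = a) => hk (h ▸ List.mem_cons_self))]

theorem pv_getD_foldl_insert_read_mem (l : List String) (hl : l.Nodup)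
    (f : List Int → List Int) (d : PySem.Dict String (List Int)) (k : String) (hk : k ∈ l) :
    (l.foldl (fun d k => d.insert k (f (d.getD k []))) d).getD k [] = f (d.getD k []) := by
  induction l generalizing d with
  | nil => cases hk
  | cons a l ih =>
      rw [List.nodup_cons] at hl
      simp only [List.foldl_cons]
      rcases List.mem_cons.mp hk with rfl | hk
      · rw [pv_getD_foldl_insert_read_notmem _ _ _ _ hl.1]
        simp
      · rw [ih hl.2 _ hk, PySem.Dict.getD_insert, if_neg (fun (h : k = a) => hl.1 (h ▸ hk))]

-- set(xs) where a leading run of a's precedes a's-free remainder: a, then set of the rest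
theorem pv_foldl_add_const {α : Type} [BEq α] [LawfulBEq α] (a : α) (m : List α)
    (h : ∀ x ∈ m, x = a) : m.foldl PySem.Set.add [a] = [a] := by
  induction m with
  | nil => rfl
  | cons b m ih =>
      have hb : b = a := h b List.mem_cons_self
      subst hb
      rw [List.foldl_cons, PySem.Set.add_of_mem (by simp)]
      exact ih (fun x hx => h x (List.mem_cons_of_mem _ hx))

theorem pv_ofList_run {α : Type} [BEq α] [LawfulBEq α] (a : α) (m m2 : List α)
    (h1 : ∀ x ∈ m, x = a) (h2 : a ∉ m2) :
    PySem.Set.ofList (a :: (m ++ m2)) = a :: PySem.Set.ofList m2 := by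
  have hsplit : a :: (m ++ m2) = (a :: m) ++ m2 := rfl
  rw [hsplit, PySem.Set.ofList_append]
  have hm : PySem.Set.ofList (a :: m) = [a] := by
    rw [PySem.Set.ofList_eq_foldl, List.foldl_cons]
    have hadd : PySem.Set.add (PySem.Set.empty : List α) a = [a] := by
      simp [PySem.Set.add, PySem.Set.empty, PySem.Set.contains]
    show List.foldl PySem.Set.add (PySem.Set.add (PySem.Set.empty : List α) a) m = [a]
    rw [hadd]
    exact pv_foldl_add_const a m h1
  rw [hm, PySem.Set.update_eq_append_filter]
  have hfilter : (PySem.Set.ofList m2).filter (fun y => !(PySem.Set.contains [a] y)) = PySem.Set.ofList m2 := by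
    apply List.filter_eq_self.mpr
    intro y hy
    have hym : y ∈ m2 := (PySem.Set.mem_ofList _ _).mp hy
    have hne : y ≠ a := fun h => h2 (h ▸ hym)
    simp
    exact hne
  rw [hfilter]
  rfl

-- head of dropWhile fails the predicate
theorem pv_dropWhile_head {α : Type} (pred : α → Bool) (t : List α) (r0 : α) (r' : List α)
    (h : t.dropWhile pred = r0 :: r') : pred r0 = false := by
  induction t with
  | nil => simp [List.dropWhile] at h
  | cons b t ih =>
      by_cases hb : pred b = true
      · rw [List.dropWhile_cons, if_pos hb] at h
        exact ih h
      · rw [List.dropWhile_cons, if_neg hb] at h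
        cases h
        exact Bool.not_eq_true _ ▸ hb

-- the run scan on a list sorted by first component = a map over its distinct keys
def pvSpecItems (l : List (String × Int)) : List (String × List Int) :=
  (PySem.Set.ofList (l.map Prod.fst)).map
    (fun k => (k, (l.filter (fun p => p.1 == k)).map Prod.snd))

theorem pv_runs_eq_aux (n : Nat) : ∀ (l : List (String × Int)), l.length ≤ n →
    l.Pairwise (fun a b => a.1 ≤ b.1) → pvRuns l = pvSpecItems l := by
  induction n with
  | zero =>
      intro l hn _
      have : l = [] := List.eq_nil_of_length_eq_zero (Nat.le_zero.mp hn)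
      subst this; simp [pvRuns, pvSpecItems]
  | succ n ih =>
      intro l hn hle
      cases l with
      | nil => simp [pvRuns, pvSpecItems]
      | cons p t =>
      rw [List.pairwise_cons] at hle
      set pred := fun q : String × Int => q.1 == p.1 with hpred
      set m := t.takeWhile pred with hm
      set r := t.dropWhile pred with hr
      have htmr : t = m ++ r := (List.takeWhile_append_dropWhile (p := pred) (l := t)).symm
      have hmem_m : ∀ x ∈ m, x.1 = p.1 := by
        intro x hx
        have := List.mem_takeWhile_imp hx
        simpa [hpred] using this
      have hmem_r : ∀ x ∈ r, p.1 < x.1 := by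
        cases hrc : r with
        | nil => intro x hx; simp at hx
        | cons r0 r' =>
            have hfail : pred r0 = false := pv_dropWhile_head pred t r0 r' (hr ▸ hrc)
            have hne : r0.1 ≠ p.1 := by simpa [hpred] using hfail
            have hmemt : ∀ x ∈ r, x ∈ t := fun x hx => htmr ▸ List.mem_append_right m hx
            have hler0 : p.1 < r0.1 :=
              lt_of_le_of_ne (hle.1 r0 (hmemt r0 (hrc ▸ List.mem_cons_self))) (Ne.symm hne)
            have hpr : r.Pairwise (fun a b : String × Int => a.1 ≤ b.1) := by
              rw [hr]; exact hle.2.sublist (List.dropWhile_sublist (l := t) (p := pred))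
            rw [hrc] at hpr
            rw [List.pairwise_cons] at hpr
            intro x hx
            rcases List.mem_cons.mp hx with rfl | hx'
            · exact hler0
            · exact lt_of_lt_of_le hler0 (hpr.1 x hx')
      have hnotmem : p.1 ∉ r.map Prod.fst := by
        intro hmem
        rcases List.mem_map.mp hmem with ⟨x, hx, hfx⟩
        exact absurd (hfx ▸ hmem_r x hx) (lt_irrefl _)
      -- unfold one step of pvRuns
      have hstep : pvRuns (p :: t) =
          (p.1, ((p :: t).takeWhile pred).map Prod.snd) :: pvRuns r := by
        rw [pvRuns]
      rw [hstep]
      have htake : (p :: t).takeWhile pred = p :: m := by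
        rw [List.takeWhile_cons, if_pos (by simp [hpred])]
      -- the spec side
      have hkeys : PySem.Set.ofList ((p :: t).map Prod.fst)
          = p.1 :: PySem.Set.ofList (r.map Prod.fst) := by
        have : (p :: t).map Prod.fst = p.1 :: (m.map Prod.fst ++ r.map Prod.fst) := by
          rw [List.map_cons, htmr, List.map_append]
        rw [this]
        exact pv_ofList_run p.1 (m.map Prod.fst) (r.map Prod.fst)
          (by intro x hx; rcases List.mem_map.mp hx with ⟨y, hy, rfl⟩; exact hmem_m y hy)
          hnotmem
      have hfilter_p : (p :: t).filter (fun q => q.1 == p.1) = p :: m := by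
        rw [List.filter_cons, if_pos (by simp)]
        congr 1
        rw [htmr, List.filter_append]
        have h1 : m.filter (fun q => q.1 == p.1) = m :=
          List.filter_eq_self.mpr (fun x hx => by simp [hmem_m x hx])
        have h2 : r.filter (fun q => q.1 == p.1) = [] :=
          List.filter_eq_nil_iff.mpr (fun x hx => by
            simp only [beq_iff_eq]
            exact fun h => absurd (h ▸ hmem_r x hx) (lt_irrefl _))
        rw [h1, h2, List.append_nil]
      have hfilter_k : ∀ k ∈ PySem.Set.ofList (r.map Prod.fst),
          (p :: t).filter (fun q => q.1 == k) = r.filter (fun q => q.1 == k) := by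
        intro k hk
        have hkr : k ∈ r.map Prod.fst := (PySem.Set.mem_ofList _ _).mp hk
        rcases List.mem_map.mp hkr with ⟨x, hx, rfl⟩
        have hkp : x.1 ≠ p.1 := fun h => absurd (h ▸ hmem_r x hx) (lt_irrefl _)
        rw [List.filter_cons, if_neg (by simp [hkp.symm])]
        rw [htmr, List.filter_append]
        have h1 : m.filter (fun q => q.1 == x.1) = [] :=
          List.filter_eq_nil_iff.mpr (fun y hy => by
            simp only [beq_iff_eq]
            exact fun h => hkp ((h ▸ hmem_m y hy)))
        rw [h1, List.nil_append]
      have hpr : r.Pairwise (fun a b : String × Int => a.1 ≤ b.1) := by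
        rw [hr]; exact hle.2.sublist (List.dropWhile_sublist (l := t) (p := pred))
      have hlen : r.length ≤ n := by
        have h1 : r.length ≤ t.length := by
          rw [hr]; exact (List.dropWhile_sublist (l := t) (p := pred)).length_le
        simp only [List.length_cons] at hn
        omega
      rw [ih r hlen hpr]
      unfold pvSpecItems
      rw [hkeys, List.map_cons, htake, hfilter_p]
      congr 1
      exact List.map_congr_left (fun k hk => by rw [hfilter_k k hk])

-- ===== VERDICT =====
theorem scope_pairs_to_nav_map_py_spec : Claim_equal_scope_pairs_to_nav_map_py := by
  intro sp _
  unfold Spec_scope_pairs_to_nav_map_py scope_pairs_to_nav_map_py scope_pairs_to_nav_map_py_alt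
  dsimp only
  generalize sp.getD [] = xs
  set pairs := PySem.List.sorted2 (PySem.Set.ofList xs) Prod.fst Prod.snd with hpairs
  set d1 := pairs.foldl (fun d p => d.modify p.1 [] (fun l => l ++ [p.2])) PySem.Dict.empty with hd1
  set d2 := d1.keys.foldl (fun d k => d.insert k (PySem.List.sorted (PySem.Set.ofList (d.getD k [])) (fun y => y))) d1 with hd2
  -- generic facts about pairs
  have hlex : pairs.Pairwise pvLex := pv_sorted2_pairwise (PySem.Set.ofList xs)
  have hndpairs : pairs.Nodup :=
    (List.Perm.nodup_iff (PySem.List.sorted2_perm _ _ _ _)).mpr (PySem.Set.nodup_ofList xs)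
  have hfstle : pairs.Pairwise (fun a b : String × Int => a.1 ≤ b.1) := by
    refine hlex.imp ?_
    intro a b h
    rcases h with h | ⟨h, _⟩
    · exact le_of_lt h
    · exact le_of_eq h
  -- d1 characterisation
  have h1keys : d1.keys = PySem.Set.ofList (pairs.map Prod.fst) := by
    have := PySem.Dict.keys_foldl_modify_key pairs Prod.fst ([] : List Int)
      (fun _ p l => l ++ [p.2]) PySem.Dict.empty
    simpa [PySem.Dict.keys_empty, PySem.Set.update_nil_left] using this
  have h1nd : d1.keys.Nodup := h1keys ▸ PySem.Set.nodup_ofList _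
  have h1getD : ∀ k, d1.getD k [] = (pairs.filter (fun p => p.1 == k)).map (·.2) := by
    intro k
    have := PySem.Dict.getD_foldl_modify_append pairs PySem.Dict.empty k
    simpa [PySem.Dict.getD_empty] using this
  -- d2 characterisation
  have h2keys : d2.keys = d1.keys := by
    rw [hd2]
    have := PySem.Dict.keys_foldl_insert d1.keys
      (fun d k => PySem.List.sorted (PySem.Set.ofList (d.getD k [])) (fun y => y)) d1
    rw [this, PySem.Set.update_eq_append_filter]
    have hnil : (PySem.Set.ofList d1.keys).filter (fun y => !PySem.Set.contains d1.keys y) = [] := by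
      apply List.filter_eq_nil_iff.mpr
      intro y hy
      have : y ∈ d1.keys := (PySem.Set.mem_ofList _ _).mp hy
      simp [this]
    rw [hnil, List.append_nil]
  have h2nd : d2.keys.Nodup := h2keys ▸ h1nd
  have h2getD : ∀ k ∈ d1.keys, d2.getD k []
      = PySem.List.sorted (PySem.Set.ofList (d1.getD k [])) (fun y => y) := by
    intro k hk
    exact pv_getD_foldl_insert_read_mem d1.keys h1nd
      (fun v => PySem.List.sorted (PySem.Set.ofList v) (fun y => y)) d1 k hk
  have hitemsA : d2.items = d1.keys.map (fun k => (k, d2.getD k [])) := by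
    rw [PySem.Dict.items_eq_map_keys d2 h2nd ([] : List Int), h2keys]
  -- d1's key order is already sorted (first occurrences of a lex-sorted pair list)
  have E2 : PySem.List.sorted d1.keys (fun k => k) = d1.keys := by
    apply PySem.List.sorted_eq_of_perm_of_pairwise_lt _ _ _ (List.Perm.refl _)
    have hpw : (pairs.map Prod.fst).Pairwise (· ≤ ·) := by
      refine List.Pairwise.map Prod.fst ?_ hfstle
      exact fun a b h => h
    have hsub : d1.keys.Sublist (pairs.map Prod.fst) := h1keys ▸ pv_ofList_sublist _
    have hle : d1.keys.Pairwise (fun a b : String => a ≤ b) := hpw.sublist hsub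
    have hne : d1.keys.Pairwise (fun a b : String => a ≠ b) := h1nd
    exact (hle.and hne).imp (fun h => lt_of_le_of_ne h.1 h.2)
  -- per key, the filtered year list is already strictly increasing and duplicate-free
  have hyears : ∀ k, ((pairs.filter (fun p => p.1 == k)).map (·.2)).Pairwise (· < ·) := by
    intro k
    have hfilt : (pairs.filter (fun p => p.1 == k)).Pairwise (fun a b => pvLex a b ∧ a ≠ b) :=
      (hlex.and hndpairs).filter _
    have hsnd : (pairs.filter (fun p => p.1 == k)).Pairwise
        (fun a b : String × Int => a.2 < b.2) := by
      refine List.Pairwise.imp_of_mem ?_ hfilt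
      intro a b ha hb h
      have hak : a.1 = k := by simpa using (List.mem_filter.mp ha).2
      have hbk : b.1 = k := by simpa using (List.mem_filter.mp hb).2
      rcases h.1 with hlt | ⟨heq, hle2⟩
      · exact absurd (hak ▸ hbk ▸ hlt) (lt_irrefl _)
      · refine lt_of_le_of_ne hle2 ?_
        intro hsndeq
        exact h.2 (Prod.ext heq hsndeq)
    exact List.Pairwise.map _ (fun a b h => h) hsnd
  -- B's run scan equals the same map over the same keys
  have hruns : pvRuns pairs = pvSpecItems pairs :=
    pv_runs_eq_aux pairs.length pairs (le_refl _) hfstle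
  -- B's dict(items) over the fresh distinct run keys is the run list itself
  have hBkeys : (pvSpecItems pairs).map Prod.fst = PySem.Set.ofList (pairs.map Prod.fst) := by
    unfold pvSpecItems
    rw [List.map_map]
    simp [Function.comp_def]
  have hBnd : ((pvRuns pairs).map Prod.fst).Nodup := by
    rw [hruns, hBkeys]; exact PySem.Set.nodup_ofList _
  have hBitems : ((pvRuns pairs).foldl (fun d kv => d.insert kv.1 kv.2) PySem.Dict.empty).items
      = pvRuns pairs := by
    have := PySem.Dict.items_foldl_insert_fresh (pvRuns pairs) Prod.fst Prod.snd PySem.Dict.empty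
      (fun a _ => PySem.Dict.contains_empty a.1) hBnd
    simpa using this
  -- assemble both sides
  refine Prod.ext ?_ ?_
  · show PySem.List.sorted d2.keys (fun k => k) = (pvRuns pairs).map Prod.fst
    rw [h2keys, E2, hruns, hBkeys, h1keys]
  · show d2.items = ((pvRuns pairs).foldl (fun d kv => d.insert kv.1 kv.2) PySem.Dict.empty).items
    rw [hBitems, hruns, hitemsA]
    unfold pvSpecItems
    rw [← h1keys]
    apply List.map_congr_left
    intro k hk
    rw [h2getD k hk, h1getD k]
    have hnd : ((pairs.filter (fun p => p.1 == k)).map (·.2)).Nodup :=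
      (hyears k).imp (fun h => ne_of_lt h)
    rw [PySem.Set.ofList_eq_self_of_nodup _ hnd]
    rw [PySem.List.sorted_eq_of_perm_of_pairwise_lt _ _ _ (List.Perm.refl _) (hyears k)]
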